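-- pv_equiv track=rewrite | github.com/seeheee/Algorithm | Programmers/고득점 kit/완전탐색/mock test.py | solution
-- ===== SOURCE A (Python) =====
-- def solution(answers):
--     student1 = [1, 2, 3, 4, 5]
--     student2 = [2, 1, 2, 3, 2, 4, 2, 5]
--     student3 = [3, 3, 1, 1, 2, 2, 4, 4, 5, 5]
--
--     student1_cnt = 0
--     student2_cnt = 0
--     student3_cnt = 0
--
--     list1 = []
--     for idx, i in enumerate(answers):
--         if i == student1[idx % 5]:
--             student1_cnt += 1
--         if i == student2[idx % 8]:
--             student2_cnt += 1
--         if i == student3[idx % 10]: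
--             student3_cnt += 1
--
--     dic = {1: student1_cnt, 2: student2_cnt, 3: student3_cnt}
--     highscore = max(dic.values())
--
--     for key, val in dic.items():
--         if val == highscore:
--             list1.append(key)
--
--     return list1
-- ===== SOURCE B (Python) =====
-- def solution(answers):
--     # One pass builds a histogram keyed by (position mod 40, answer); since
--     # 40 = lcm(5, 8, 10), each pattern's score is then recovered in O(40)
--     # from the histogram alone, without rescanning the answers per pattern.
--     hist = {}
--     for i, a in enumerate(answers):
--         key = (i % 40, a)
--         hist[key] = hist.get(key, 0) + 1
--
--     patterns = [[1, 2, 3, 4, 5],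
--                 [2, 1, 2, 3, 2, 4, 2, 5],
--                 [3, 3, 1, 1, 2, 2, 4, 4, 5, 5]]
--     scores = []
--     for p in patterns:
--         n = len(p)
--         scores.append(sum(hist.get((j, p[j % n]), 0) for j in range(40)))
--
--     high = max(scores)
--     return [k + 1 for k, s in enumerate(scores) if s == high]
-- ===== Notes on version B (the rewrite author's own statement) =====
-- stated objective: alternative
-- what changed: Replaces A's fused three-counter scan (three pattern comparisons per answer) by a single histogram pass keyed by (index mod 40, answer) -- 40 = lcm(5,8,10) -- from which each pattern's score is recovered by 40 aggregated lookups, then max over the score list.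
import Mathlib
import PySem

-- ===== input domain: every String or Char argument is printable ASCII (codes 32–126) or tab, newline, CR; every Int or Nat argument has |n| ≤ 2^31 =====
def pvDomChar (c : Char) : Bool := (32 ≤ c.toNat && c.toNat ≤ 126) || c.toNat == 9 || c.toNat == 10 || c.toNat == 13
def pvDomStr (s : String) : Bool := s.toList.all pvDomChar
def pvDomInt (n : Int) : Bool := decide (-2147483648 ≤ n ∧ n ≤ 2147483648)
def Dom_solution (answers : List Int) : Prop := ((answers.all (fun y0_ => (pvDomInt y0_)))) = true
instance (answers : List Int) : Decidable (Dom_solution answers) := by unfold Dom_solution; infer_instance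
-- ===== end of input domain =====

-- B replaces A's fused three-counter comparison loop by one histogram pass keyed by
-- (index mod 40, answer) — 40 = lcm(5,8,10) — from which each pattern's score is
-- recovered by 40 aggregated lookups (alternative data structure; same O(n) cost).

-- ===== PORT A =====
-- one fused loop over enumerate(answers) keeping three counters, then a dict, max of its
-- values, and a loop over its items appending the keys with the high score
def solution (answers : List Int) : List Int :=
  let student1 : List Int := [1, 2, 3, 4, 5]
  let student2 : List Int := [2, 1, 2, 3, 2, 4, 2, 5]
  let student3 : List Int := [3, 3, 1, 1, 2, 2, 4, 4, 5, 5]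
  let cnts : Int × Int × Int :=
    (PySem.List.enumerate answers 0).foldl
      (fun (c : Int × Int × Int) (p : Int × Int) =>
        let c1 := if p.2 = PySem.List.pyGetD student1 (PySem.Int.mod p.1 5) 0 then c.1 + 1 else c.1
        let c2 := if p.2 = PySem.List.pyGetD student2 (PySem.Int.mod p.1 8) 0 then c.2.1 + 1 else c.2.1
        let c3 := if p.2 = PySem.List.pyGetD student3 (PySem.Int.mod p.1 10) 0 then c.2.2 + 1 else c.2.2
        (c1, c2, c3)) (0, 0, 0)
  let dic : PySem.Dict Int Int := PySem.Dict.ofList [(1, cnts.1), (2, cnts.2.1), (3, cnts.2.2)]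
  -- dic has three entries, so max(dic.values()) never raises; .getD 0 is unreachable
  let highscore : Int := (PySem.List.max? dic.values (fun x => x)).getD 0
  dic.items.foldl (fun acc kv => if kv.2 = highscore then acc ++ [kv.1] else acc) []

-- ===== PORT B =====
-- Source B: one loop building hist[(i % 40, a)] += 1, then per pattern a sum of 40
-- histogram lookups hist.get((j, p[j % n]), 0) over range(40), then max/comprehension
def solution_alt (answers : List Int) : List Int :=
  let hist : PySem.Dict (Int × Int) Int :=
    (PySem.List.enumerate answers 0).foldl
      (fun d q =>
        let key : Int × Int := (PySem.Int.mod q.1 40, q.2)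
        d.insert key (d.getD key 0 + 1))
      PySem.Dict.empty
  let patterns : List (List Int) :=
    [[1, 2, 3, 4, 5], [2, 1, 2, 3, 2, 4, 2, 5], [3, 3, 1, 1, 2, 2, 4, 4, 5, 5]]
  let scores : List Int :=
    patterns.foldl
      (fun acc p =>
        let n : Int := (p.length : Int)
        acc ++ [((PySem.List.pyRange 0 40 1).map
                  (fun j => hist.getD (j, PySem.List.pyGetD p (PySem.Int.mod j n) 0) 0)).sum])
      []
  -- scores has three entries, so max(scores) never raises; .getD 0 is unreachable
  let high : Int := (PySem.List.max? scores (fun x => x)).getD 0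
  (PySem.List.enumerate scores 0).foldl
    (fun acc q => if q.2 = high then acc ++ [q.1 + 1] else acc) []

-- ===== PRECONDITION & SPEC =====
def Spec_solution (answers : List Int) (out : List Int) : Prop := out = solution_alt answers
instance (answers : List Int) (out : List Int) : Decidable (Spec_solution answers out) := by unfold Spec_solution; infer_instance

-- ===== CLAIM (what is proved, stated in full; the proofs are below) =====
def Claim_equal_solution : Prop := ∀ (answers : List Int), Dom_solution answers → Spec_solution answers (solution answers)

-- ===== LEMMAS AND PROOFS =====

-- partial score of pattern p over enumerate l s (A's per-pattern count)
def pvScoreFrom (p : List Int) (m : Int) (l : List Int) (s : Int) : Int :=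
  ((PySem.List.enumerate l s).map
    (fun q => if q.2 = PySem.List.pyGetD p (PySem.Int.mod q.1 m) 0 then (1 : Int) else 0)).sum

-- A's fused fold computes the three per-pattern scores componentwise
theorem pvFused (l : List Int) : ∀ (s c1 c2 c3 : Int),
    (PySem.List.enumerate l s).foldl
      (fun (c : Int × Int × Int) (p : Int × Int) =>
        let d1 := if p.2 = PySem.List.pyGetD [1,2,3,4,5] (PySem.Int.mod p.1 5) 0 then c.1 + 1 else c.1
        let d2 := if p.2 = PySem.List.pyGetD [2,1,2,3,2,4,2,5] (PySem.Int.mod p.1 8) 0 then c.2.1 + 1 else c.2.1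
        let d3 := if p.2 = PySem.List.pyGetD [3,3,1,1,2,2,4,4,5,5] (PySem.Int.mod p.1 10) 0 then c.2.2 + 1 else c.2.2
        (d1, d2, d3)) (c1, c2, c3)
    = (c1 + pvScoreFrom [1,2,3,4,5] 5 l s,
       c2 + pvScoreFrom [2,1,2,3,2,4,2,5] 8 l s,
       c3 + pvScoreFrom [3,3,1,1,2,2,4,4,5,5] 10 l s) := by
  induction l with
  | nil => intro s c1 c2 c3; simp [pvScoreFrom, PySem.List.enumerate_nil]
  | cons a t ih =>
    intro s c1 c2 c3
    simp only [PySem.List.enumerate_cons, List.foldl_cons, List.map_cons, List.sum_cons, pvScoreFrom]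
    rw [ih]
    simp only [pvScoreFrom]
    split_ifs <;> simp only [Prod.mk.injEq] <;> refine ⟨by ring, by ring, by ring⟩

-- an indicator summed over a list not containing k1 is 0
theorem pvIndZero (f : Int → Int) (k1 k2 : Int) : ∀ (R : List Int), k1 ∉ R →
    (R.map (fun j => if (j, f j) = (k1, k2) then (1 : Int) else 0)).sum = 0 := by
  intro R
  induction R with
  | nil => intro _; simp
  | cons r t ih =>
    intro h
    have hr : r ≠ k1 := fun hrk => h (hrk ▸ List.mem_cons_self)
    have ht : k1 ∉ t := fun htm => h (List.mem_cons_of_mem _ htm)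
    simp only [List.map_cons, List.sum_cons]
    rw [ih ht]
    simp [hr]

-- an indicator summed over a Nodup list containing k1 picks out the k1 term
theorem pvInd (f : Int → Int) (k1 k2 : Int) : ∀ (R : List Int), R.Nodup → k1 ∈ R →
    (R.map (fun j => if (j, f j) = (k1, k2) then (1 : Int) else 0)).sum
      = if f k1 = k2 then 1 else 0 := by
  intro R
  induction R with
  | nil => intro _ h; cases h
  | cons r t ih =>
    intro hnd hmem
    have hnd' := List.nodup_cons.mp hnd
    simp only [List.map_cons, List.sum_cons]
    by_cases hr : r = k1
    · subst hr
      rw [pvIndZero f r k2 t hnd'.1]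
      simp
    · have hmem' : k1 ∈ t := by
        rcases List.mem_cons.mp hmem with h | h
        · exact absurd h.symm hr
        · exact h
      rw [ih hnd'.2 hmem']
      simp [hr]

-- nested mod: (s % 40) % n = s % n when n divides 40
theorem pvModMod (s n : Int) (hpos : 0 < n) (hdvd : n ∣ 40) :
    PySem.Int.mod (PySem.Int.mod s 40) n = PySem.Int.mod s n := by
  rw [PySem.Int.mod_eq_emod_of_pos (show (0:Int) < 40 by norm_num)]
  rw [PySem.Int.mod_eq_emod_of_pos hpos, PySem.Int.mod_eq_emod_of_pos hpos]
  exact Int.emod_emod_of_dvd s hdvd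

-- B's 40 histogram-count lookups for pattern p sum to A's per-pattern score
theorem pvSum (p : List Int) (n : Int) (hpos : 0 < n) (hdvd : n ∣ 40) :
    ∀ (l : List Int) (s : Int), 0 ≤ s →
    ((PySem.List.pyRange 0 40 1).map
      (fun j => ((((PySem.List.enumerate l s).map
          (fun q => (PySem.Int.mod q.1 40, q.2))).count
            (j, PySem.List.pyGetD p (PySem.Int.mod j n) 0) : Nat) : Int))).sum
    = pvScoreFrom p n l s := by
  intro l
  induction l with
  | nil => intro s _; simp [pvScoreFrom, PySem.List.enumerate_nil]
  | cons a t ih =>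
    intro s hs
    have hstep :
        ((PySem.List.pyRange 0 40 1).map
          (fun j => ((((PySem.List.enumerate (a :: t) s).map
              (fun q => (PySem.Int.mod q.1 40, q.2))).count
                (j, PySem.List.pyGetD p (PySem.Int.mod j n) 0) : Nat) : Int))).sum
        = ((PySem.List.pyRange 0 40 1).map
            (fun j => ((((PySem.List.enumerate t (s + 1)).map
                (fun q => (PySem.Int.mod q.1 40, q.2))).count
                  (j, PySem.List.pyGetD p (PySem.Int.mod j n) 0) : Nat) : Int)
              + if (j, PySem.List.pyGetD p (PySem.Int.mod j n) 0)
                    = (PySem.Int.mod s 40, a) then (1 : Int) else 0)).sum := by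
      apply congrArg List.sum
      apply List.map_congr_left
      intro j _
      simp only [PySem.List.enumerate_cons, List.map_cons, List.count_cons]
      push_cast
      simp only [beq_iff_eq]
      congr 1
      rw [if_congr (eq_comm) rfl rfl]
    rw [hstep, PySem.List.sum_map_add_int, ih (s + 1) (by omega)]
    have hmem : PySem.Int.mod s 40 ∈ PySem.List.pyRange 0 40 1 := by
      rw [PySem.List.mem_pyRange_one]
      exact ⟨PySem.Int.mod_nonneg s (by norm_num), PySem.Int.mod_lt s (by norm_num)⟩
    rw [pvInd (fun j => PySem.List.pyGetD p (PySem.Int.mod j n) 0) (PySem.Int.mod s 40) a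
        (PySem.List.pyRange 0 40 1) (by decide) hmem]
    simp only [pvScoreFrom, PySem.List.enumerate_cons, List.map_cons, List.sum_cons]
    rw [pvModMod s n hpos hdvd]
    have hflip : (if PySem.List.pyGetD p (PySem.Int.mod s n) 0 = a then (1:Int) else 0)
         = (if a = PySem.List.pyGetD p (PySem.Int.mod s n) 0 then (1:Int) else 0) := by
      simp [eq_comm]
    rw [hflip]
    ring

-- A's dict/max/items part equals B's scores/max/comprehension part given equal scores
theorem pvFinish (c1 c2 c3 : Int) :
    (let dic : PySem.Dict Int Int := PySem.Dict.ofList [(1, c1), (2, c2), (3, c3)]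
     let highscore : Int := (PySem.List.max? dic.values (fun x => x)).getD 0
     dic.items.foldl (fun acc kv => if kv.2 = highscore then acc ++ [kv.1] else acc) [])
    = (let scores : List Int := [c1, c2, c3]
       let high : Int := (PySem.List.max? scores (fun x => x)).getD 0
       (PySem.List.enumerate scores 0).foldl
         (fun acc q => if q.2 = high then acc ++ [q.1 + 1] else acc) []) := by
  have h : (PySem.Dict.ofList [(1, c1), (2, c2), (3, c3)] : PySem.Dict Int Int).items
      = [(1, c1), (2, c2), (3, c3)] := by
    simp [PySem.Dict.ofList, PySem.Dict.update, PySem.Dict.empty, PySem.Dict.insert]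
  simp only [PySem.Dict.values, h, PySem.List.max?, PySem.List.enumerate_cons,
    PySem.List.enumerate_nil, List.foldl, List.map]
  norm_num

-- ===== VERDICT (by name: the statement is the Claim_ definition above) =====
theorem solution_spec : Claim_equal_solution := by
  intro answers _
  unfold Spec_solution solution solution_alt
  simp only []
  rw [pvFused]
  have hhist : ∀ (k : Int × Int),
      ((PySem.List.enumerate answers 0).foldl
        (fun (d : PySem.Dict (Int × Int) Int) q =>
          let key : Int × Int := (PySem.Int.mod q.1 40, q.2)
          d.insert key (d.getD key 0 + 1))
        PySem.Dict.empty).getD k 0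
      = ((((PySem.List.enumerate answers 0).map
            (fun q => (PySem.Int.mod q.1 40, q.2))).count k : Nat) : Int) := by
    intro k
    rw [← List.foldl_map (f := fun (q : Int × Int) => (PySem.Int.mod q.1 40, q.2))
        (g := fun (d : PySem.Dict (Int × Int) Int) key => d.insert key (d.getD key 0 + 1))]
    rw [PySem.Dict.getD_foldl_insert_add_one]
    rw [PySem.Dict.getD_empty, zero_add]
  simp only [List.foldl_cons, List.foldl_nil, List.nil_append, List.length_cons,
    List.length_nil, hhist]
  norm_num only
  rw [pvSum [1,2,3,4,5] 5 (by norm_num) (by norm_num) answers 0 le_rfl,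
      pvSum [2,1,2,3,2,4,2,5] 8 (by norm_num) (by norm_num) answers 0 le_rfl,
      pvSum [3,3,1,1,2,2,4,4,5,5] 10 (by norm_num) (by norm_num) answers 0 le_rfl]
  simp only [zero_add, List.singleton_append]
  exact pvFinish _ _ _
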